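-- pv_equiv track=rewrite | github.com/vtRodrigues92/RPAs_Cassinos | AVIATOR/Saulo/Catalogador/bot_catalogador.py | calc_intervalo_maximo
-- ===== SOURCE A (Python) =====
-- def calc_intervalo_maximo(sequencia):
--     intervalos_maximos = {}
--     last_occurrence = {}
--     for idx, classe in enumerate(sequencia):
--         if classe in last_occurrence:
--             interval = idx - last_occurrence[classe]
--             if classe not in intervalos_maximos or interval > intervalos_maximos[classe]:
--                 intervalos_maximos[classe] = interval
--         last_occurrence[classe] = idx
--     return intervalos_maximos
-- ===== SOURCE B (Python) =====
-- def calc_intervalo_maximo(sequencia):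
--     positions = {}
--     order = []  # classes in the order they first repeat (= A's dict insertion order)
--     for idx, classe in enumerate(sequencia):
--         ps = positions.setdefault(classe, [])
--         if len(ps) == 1:
--             order.append(classe)
--         ps.append(idx)
--     return {c: max(b - a for a, b in zip(positions[c], positions[c][1:]))
--             for c in order}
-- ===== Notes on version B (the rewrite author's own statement) =====
-- stated objective: alternative
-- what changed: Instead of maintaining a running maximum and last-occurrence dict, B groups all occurrence indices per class in one pass (recording the order in which classes first repeat) and then computes each repeated class's maximum gap as max over zip(ps, ps[1:]).
import Mathlib
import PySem

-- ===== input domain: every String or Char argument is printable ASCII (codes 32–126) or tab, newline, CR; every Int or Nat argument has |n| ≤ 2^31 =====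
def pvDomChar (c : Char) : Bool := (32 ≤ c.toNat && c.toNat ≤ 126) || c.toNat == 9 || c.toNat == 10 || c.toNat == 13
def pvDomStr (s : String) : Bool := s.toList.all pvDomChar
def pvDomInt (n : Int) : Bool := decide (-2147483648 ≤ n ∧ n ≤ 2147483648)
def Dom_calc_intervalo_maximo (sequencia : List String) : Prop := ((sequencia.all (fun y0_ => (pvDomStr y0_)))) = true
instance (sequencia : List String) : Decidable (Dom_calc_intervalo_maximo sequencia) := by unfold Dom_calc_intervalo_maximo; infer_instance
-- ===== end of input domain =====

-- B replaces A's running-max/last-occurrence pass by grouping all indices per class in one pass,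
-- then computing each repeated class's max gap over consecutive positions (objective: alternative).


-- ===== PORT A =====
-- loop body of A, named for the proofs; state = (intervalos_maximos, last_occurrence)
def pvStepA (st : PySem.Dict String Int × PySem.Dict String Int) (pr : Int × String) :
    PySem.Dict String Int × PySem.Dict String Int :=
  let m := if st.2.contains pr.2 then
      let interval := pr.1 - st.2.getD pr.2 0
      if (!st.1.contains pr.2) || decide (interval > st.1.getD pr.2 0) then
        st.1.insert pr.2 interval
      else st.1
    else st.1
  (m, st.2.insert pr.2 pr.1)

def calc_intervalo_maximo (sequencia : List String) : List (String × Int) :=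
  (((PySem.List.enumerate sequencia).foldl pvStepA (PySem.Dict.empty, PySem.Dict.empty)).1).items

-- ===== PORT B =====
-- max(b - a for a, b in zip(ps, ps[1:])); only evaluated on lists with ≥ 2 elements,
-- so max? is some there and the .getD 0 default is never the result
def pvGaps (xs : List Int) : List Int := (xs.zip (xs.drop 1)).map (fun q => q.2 - q.1)
def pvGmax (xs : List Int) : Int := (PySem.List.max? (pvGaps xs) (fun y => y)).getD 0

-- loop body of B: positions.setdefault(classe, []) + append, and order bookkeeping
def pvStepB (st : PySem.Dict String (List Int) × List String) (pr : Int × String) :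
    PySem.Dict String (List Int) × List String :=
  let ps := st.1.getD pr.2 []
  let order := if ps.length == 1 then st.2 ++ [pr.2] else st.2
  (st.1.modify pr.2 [] (· ++ [pr.1]), order)

def calc_intervalo_maximo_alt (sequencia : List String) : List (String × Int) :=
  let st := (PySem.List.enumerate sequencia).foldl pvStepB (PySem.Dict.empty, [])
  st.2.map (fun c => (c, pvGmax (st.1.getD c [])))

-- ===== PRECONDITION & SPEC =====
def Spec_calc_intervalo_maximo (sequencia : List String) (out : List (String × Int)) : Prop := out = calc_intervalo_maximo_alt sequencia
instance (sequencia : List String) (out : List (String × Int)) : Decidable (Spec_calc_intervalo_maximo sequencia out) := by unfold Spec_calc_intervalo_maximo; infer_instance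

-- ===== CLAIM (what is proved, stated in full; the proofs are below) =====
def Claim_equal_calc_intervalo_maximo : Prop := ∀ (sequencia : List String), Dom_calc_intervalo_maximo sequencia → Spec_calc_intervalo_maximo sequencia (calc_intervalo_maximo sequencia)

-- ===== LEMMAS AND PROOFS =====

theorem pvGaps_cons_cons (a b : Int) (t : List Int) :
    pvGaps (a :: b :: t) = (b - a) :: pvGaps (b :: t) := rfl

theorem pvGaps_append (xs : List Int) (h : xs ≠ []) (i : Int) :
    pvGaps (xs ++ [i]) = pvGaps xs ++ [i - (xs.getLast?.getD 0)] := by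
  induction xs with
  | nil => cases h rfl
  | cons a t ih =>
    cases t with
    | nil => simp [pvGaps]
    | cons b t' =>
      have h2 := ih (by simp)
      rw [List.cons_append] at h2
      rw [List.cons_append, List.cons_append, pvGaps_cons_cons, h2, pvGaps_cons_cons]
      simp

theorem pvGmax_pair (a b : Int) : pvGmax [a, b] = b - a := by
  simp [pvGmax, pvGaps, PySem.List.max?]

theorem length_pvGaps (xs : List Int) : (pvGaps xs).length = xs.length - 1 := by
  simp [pvGaps]

theorem max?_id_append_singleton (l : List Int) (h : l ≠ []) (y : Int) :
    (PySem.List.max? (l ++ [y]) (fun z => z)).getD 0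
      = max ((PySem.List.max? l (fun z => z)).getD 0) y := by
  cases l with
  | nil => cases h rfl
  | cons a t =>
    rw [List.cons_append, PySem.List.max?_id_cons, PySem.List.max?_id_cons]
    simp [List.foldl_append]

theorem pvGmax_append (xs : List Int) (h : 2 ≤ xs.length) (i : Int) :
    pvGmax (xs ++ [i]) = max (pvGmax xs) (i - xs.getLast?.getD 0) := by
  have hne : xs ≠ [] := by cases xs <;> simp_all
  have hg : pvGaps xs ≠ [] := by
    have := length_pvGaps xs
    intro hnil; rw [hnil] at this; simp at this; omega
  rw [pvGmax, pvGaps_append xs hne i, max?_id_append_singleton _ hg]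
  rfl

-- the loop invariant, and the main lemma: the two folds stay related
theorem pv_loop (e : List (Int × String))
    (m l : PySem.Dict String Int) (p : PySem.Dict String (List Int)) (ord : List String)
    (H1 : ∀ c, l.get? c = (p.getD c []).getLast?)
    (H3 : m.items = ord.map (fun c => (c, pvGmax (p.getD c []))))
    (H4 : ord.Nodup)
    (H5 : ∀ c, c ∈ ord ↔ 2 ≤ (p.getD c []).length) :
    ((e.foldl pvStepA (m, l)).1).items
      = (let st := e.foldl pvStepB (p, ord)
         st.2.map (fun c => (c, pvGmax (st.1.getD c [])))) := by
  induction e generalizing m l p ord with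
  | nil => simpa using H3
  | cons pr rest ih =>
    obtain ⟨idx, c0⟩ := pr
    have hkeys : m.keys = ord := by
      show m.items.map (·.1) = ord
      rw [H3, List.map_map]
      exact List.map_id' _
    have hcontm : m.contains c0 = decide (c0 ∈ ord) := by
      rw [PySem.Dict.contains_eq_decide_mem_keys, hkeys]
    have hcontl : l.contains c0 = ((p.getD c0 []).getLast?).isSome := by
      rw [PySem.Dict.contains_eq_isSome_get?, H1]
    simp only [List.foldl_cons]
    have h1' : ∀ c, (l.insert c0 idx).get? c
        = (((p.modify c0 [] (· ++ [idx])).getD c []).getLast?) := by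
      intro c
      rw [PySem.Dict.get?_insert, PySem.Dict.getD_modify]
      split_ifs with h
      · simp
      · exact H1 c
    by_cases hmem : p.getD c0 [] = []
    · -- classe not seen before: A leaves m alone, B starts its positions list
      have hcl : l.contains c0 = false := by rw [hcontl, hmem]; rfl
      have hstepA : pvStepA (m, l) (idx, c0) = (m, l.insert c0 idx) := by
        simp [pvStepA, hcl]
      have hstepB : pvStepB (p, ord) (idx, c0)
          = (p.modify c0 [] (· ++ [idx]), ord) := by
        simp [pvStepB, hmem]
      rw [hstepA, hstepB]
      refine ih _ _ _ _ h1' ?_ H4 ?_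
      · rw [H3]
        apply List.map_congr_left
        intro c hc
        have hne : c ≠ c0 := by
          intro e; subst e
          have := (H5 c).1 hc
          rw [hmem] at this; simp at this
        rw [PySem.Dict.getD_modify, if_neg hne]
      · intro c
        rw [PySem.Dict.getD_modify]
        split_ifs with h
        · subst h
          rw [hmem]
          simp only [List.nil_append, List.length_cons, List.length_nil]
          constructor
          · intro hc; have := (H5 c).1 hc; rw [hmem] at this; simp at this
          · omega
        · exact H5 c
    · -- classe seen before
      have hcl : l.contains c0 = true := by
        rw [hcontl]; simp [List.getLast?_isSome, hmem]
      have hlast : l.getD c0 0 = (p.getD c0 []).getLast?.getD 0 := by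
        rw [PySem.Dict.getD_eq_get?_getD, H1]
      by_cases h1len : (p.getD c0 []).length = 1
      · -- second occurrence: A inserts a fresh key, B appends classe to order
        obtain ⟨a, ha⟩ := List.length_eq_one_iff.mp h1len
        have hnotmem : c0 ∉ ord := by
          intro hc; have := (H5 c0).1 hc; omega
        have hcm : m.contains c0 = false := by
          rw [hcontm]; simp [hnotmem]
        have hstepA : pvStepA (m, l) (idx, c0)
            = (m.insert c0 (idx - l.getD c0 0), l.insert c0 idx) := by
          simp [pvStepA, hcl, hcm]
        have hstepB : pvStepB (p, ord) (idx, c0)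
            = (p.modify c0 [] (· ++ [idx]), ord ++ [c0]) := by
          simp [pvStepB, h1len]
        rw [hstepA, hstepB]
        refine ih _ _ _ _ h1' ?_ ?_ ?_
        · rw [PySem.Dict.items_insert_of_not_contains _ _ hcm, H3, List.map_append,
            List.map_singleton]
          congr 1
          · apply List.map_congr_left
            intro c hc
            have hne : c ≠ c0 := fun e => hnotmem (e ▸ hc)
            rw [PySem.Dict.getD_modify, if_neg hne]
          · rw [PySem.Dict.getD_modify, if_pos rfl, ha, hlast, ha]
            simp [pvGmax_pair]
        · simp only [List.nodup_append, List.nodup_singleton, true_and]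
          exact ⟨H4, by simpa using fun c hc (e : c = c0) => hnotmem (e ▸ hc)⟩
        · intro c
          rw [PySem.Dict.getD_modify]
          by_cases h : c = c0
          · subst h
            rw [if_pos rfl, ha]
            simp
          · rw [if_neg h]
            simp only [List.mem_append, List.mem_singleton, h, or_false]
            exact H5 c
      · -- third or later occurrence: A updates its running max in place
        have hge : 2 ≤ (p.getD c0 []).length := by
          have h0 : (p.getD c0 []).length ≠ 0 := by
            simpa [List.length_eq_zero_iff] using hmem
          omega
        have hmemord : c0 ∈ ord := (H5 c0).2 hge
        have hcm : m.contains c0 = true := by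
          rw [hcontm]; simp [hmemord]
        have hget : m.getD c0 0 = pvGmax (p.getD c0 []) := by
          refine PySem.Dict.getD_of_mem_items _ ?_ ?_ 0
          · rw [H3]
            exact List.mem_map.mpr ⟨c0, hmemord, rfl⟩
          · rw [hkeys]; exact H4
        have hgm : pvGmax (p.getD c0 [] ++ [idx])
            = max (pvGmax (p.getD c0 [])) (idx - (p.getD c0 []).getLast?.getD 0) :=
          pvGmax_append _ hge idx
        have hstepB : pvStepB (p, ord) (idx, c0)
            = (p.modify c0 [] (· ++ [idx]), ord) := by
          simp [pvStepB, h1len]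
        have h5' : ∀ c, c ∈ ord ↔ 2 ≤ (((p.modify c0 [] (· ++ [idx])).getD c []).length) := by
          intro c
          rw [PySem.Dict.getD_modify]
          by_cases h : c = c0
          · subst h
            rw [if_pos rfl]
            simp only [List.length_append, List.length_cons, List.length_nil]
            constructor
            · intro _; omega
            · intro _; exact hmemord
          · rw [if_neg h]; exact H5 c
        by_cases hgt : idx - l.getD c0 0 > m.getD c0 0
        · have hstepA : pvStepA (m, l) (idx, c0)
              = (m.insert c0 (idx - l.getD c0 0), l.insert c0 idx) := by
            simp [pvStepA, hcl, hcm, hgt]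
          rw [hstepA, hstepB]
          refine ih _ _ _ _ h1' ?_ H4 h5'
          rw [PySem.Dict.items_insert_of_contains _ _ hcm, H3, List.map_map]
          apply List.map_congr_left
          intro c hc
          by_cases h : c = c0
          · subst h
            simp only [Function.comp_apply, beq_self_eq_true, if_pos]
            rw [PySem.Dict.getD_modify, if_pos rfl, hgm]
            rw [hget, hlast] at hgt
            rw [max_eq_right (le_of_lt hgt), hlast]
          · have hb : (c == c0) = false := by simp [h]
            simp only [Function.comp_apply, hb, Bool.false_eq_true, if_false]
            rw [PySem.Dict.getD_modify, if_neg h]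
        · have hstepA : pvStepA (m, l) (idx, c0) = (m, l.insert c0 idx) := by
            simp [pvStepA, hcl, hcm, hgt]
          rw [hstepA, hstepB]
          refine ih _ _ _ _ h1' ?_ H4 h5'
          rw [H3]
          apply List.map_congr_left
          intro c hc
          by_cases h : c = c0
          · subst h
            rw [PySem.Dict.getD_modify, if_pos rfl, hgm]
            rw [hget, hlast] at hgt
            rw [max_eq_left (not_lt.mp hgt), hlast] at *
          · rw [PySem.Dict.getD_modify, if_neg h]

-- ===== VERDICT (by name: the statement is the Claim_ definition above) =====
theorem calc_intervalo_maximo_spec : Claim_equal_calc_intervalo_maximo := by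
  intro sequencia _
  show _ = _
  unfold calc_intervalo_maximo calc_intervalo_maximo_alt
  exact pv_loop _ _ _ _ _ (by intro c; rfl) (by rfl) List.nodup_nil (by intro c; simp [PySem.Dict.empty, PySem.Dict.getD, PySem.Dict.get?])
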